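-- pv_equiv track=rewrite | github.com/jinyoung0612/Algorithm | python/programmers/240519.py | solution
-- ===== SOURCE A (Python) =====
-- def solution(my_string, queries):
--     my_string = list(my_string)
--     for start, end in queries:
--         reverse = ''.join(reversed(my_string[start:end+1]))
--         cnt = 0
--         for i in range(start, end+1):
--             my_string[i] = reverse[cnt]
--             cnt += 1
--     return ''.join(my_string)
-- ===== SOURCE B (Python) =====
-- def solution(my_string, queries):
--     chars = list(my_string)
--     for start, end in queries:
--         i, j = start, end
--         while i < j:
--             chars[i], chars[j] = chars[j], chars[i]
--             i += 1
--             j -= 1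
--     return ''.join(chars)
-- ===== Notes on version B (the rewrite author's own statement) =====
-- stated objective: alternative
-- what changed: Instead of building a reversed copy of the slice and writing it back element by element with a separate counter, B reverses each queried range in place with two converging index pointers that swap one pair per step.
import Mathlib
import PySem

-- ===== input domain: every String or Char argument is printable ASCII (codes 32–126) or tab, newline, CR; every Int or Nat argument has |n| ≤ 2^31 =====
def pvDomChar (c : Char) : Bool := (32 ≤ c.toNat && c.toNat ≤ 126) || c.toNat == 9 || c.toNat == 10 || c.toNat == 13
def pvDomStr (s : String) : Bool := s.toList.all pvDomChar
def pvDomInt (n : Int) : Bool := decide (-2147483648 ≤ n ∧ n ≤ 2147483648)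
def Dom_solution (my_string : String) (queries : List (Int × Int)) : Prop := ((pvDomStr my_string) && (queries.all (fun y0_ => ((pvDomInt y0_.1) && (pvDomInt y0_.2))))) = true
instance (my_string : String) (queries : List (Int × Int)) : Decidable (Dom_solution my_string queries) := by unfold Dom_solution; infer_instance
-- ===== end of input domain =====

-- B reverses each queried range in place with two converging swap pointers instead of
-- A's reversed-slice copy written back with a counter (alternative decomposition, same cost).


-- ===== PORT A =====
-- one iteration of A's inner loop: my_string[i] = reverse[cnt]; cnt += 1  (none = IndexError)
def solABody (rev : List Char) (st : Option (List Char × Int)) (i : Int) : Option (List Char × Int) :=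
  match st with
  | none => none
  | some (cur, cnt) =>
    match PySem.List.pyGet? rev cnt with
    | none => none
    | some c =>
      match PySem.List.pySet? cur i c with
      | none => none
      | some cur' => some (cur', cnt + 1)

-- one query of A: reverse = ''.join(reversed(my_string[start:end+1])); then the indexed copy-back loop
def solAStep (l : List Char) (s e : Int) : Option (List Char) :=
  let rev := (PySem.List.slice l (some s) (some (e + 1))).reverse
  ((PySem.List.pyRange s (e + 1) 1).foldl (solABody rev) (some (l, (0 : Int)))).map Prod.fst

def solution (my_string : String) (queries : List (Int × Int)) : String :=
  match queries.foldl (fun st q => st.bind (fun l => solAStep l q.1 q.2)) (some my_string.toList) with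
  | some l => String.ofList l    -- ''.join(my_string)
  | none => ""               -- unreachable under Pre_solution (Python raises IndexError)

-- ===== PORT B =====
-- B's while loop: while i < j: chars[i], chars[j] = chars[j], chars[i]; i += 1; j -= 1
def solBSwap (l : List Char) (i j : Int) : Option (List Char) :=
  if i < j then
    match PySem.List.pyGet? l i, PySem.List.pyGet? l j with
    | some ci, some cj =>
      match PySem.List.pySet? l i cj with
      | none => none
      | some l1 =>
        match PySem.List.pySet? l1 j ci with
        | none => none
        | some l2 => solBSwap l2 (i + 1) (j - 1)
    | _, _ => none
  else some l
termination_by (j - i).toNat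
decreasing_by omega

def solution_alt (my_string : String) (queries : List (Int × Int)) : String :=
  match queries.foldl (fun st q => st.bind (fun l => solBSwap l q.1 q.2)) (some my_string.toList) with
  | some l => String.ofList l    -- ''.join(chars)
  | none => ""               -- unreachable under Pre_solution

-- ===== PRECONDITION & SPEC =====
-- Pre_solution holds exactly where Python A returns normally: a non-empty range start..end must
-- either lie inside the string with non-negative indices, or consist entirely of negative indices
-- with end ≤ -2 that wrap back into the string; anywhere else A raises IndexError.
def Pre_solution (my_string : String) (queries : List (Int × Int)) : Prop :=
  ∀ q ∈ queries, q.1 ≤ q.2 →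
    ((0 ≤ q.1 ∧ q.2 < (my_string.toList.length : Int)) ∨
     (-(my_string.toList.length : Int) ≤ q.1 ∧ q.2 ≤ -2))
instance (my_string : String) (queries : List (Int × Int)) : Decidable (Pre_solution my_string queries) := by unfold Pre_solution; infer_instance

def pvWitness_solution : String × (List (Int × Int)) := ("abcdef", [(1, 4), (0, 5), (-3, -2)])

def Spec_solution (my_string : String) (queries : List (Int × Int)) (out : String) : Prop := out = solution_alt my_string queries
instance (my_string : String) (queries : List (Int × Int)) (out : String) : Decidable (Spec_solution my_string queries out) := by unfold Spec_solution; infer_instance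

-- ===== CLAIM (what is proved, stated in full; the proofs are below) =====
def Claim_equal_solution : Prop := ∀ (my_string : String) (queries : List (Int × Int)), Dom_solution my_string queries → Pre_solution my_string queries → Spec_solution my_string queries (solution my_string queries)

-- ===== LEMMAS AND PROOFS =====

def revSeg (l : List Char) (a b : Nat) : List Char :=
  l.take a ++ ((l.drop a).take (b + 1 - a)).reverse ++ l.drop (b + 1)

lemma revSeg_getElem (l : List Char) (a b : Nat) (hab : a ≤ b + 1) (hb : b < l.length)
    (i : Nat) (hi : i < (revSeg l a b).length) :
    (revSeg l a b)[i] = if h : i < a ∨ b < i then l[i]'(by simp [revSeg] at hi; omega)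
      else l[a + b - i]'(by omega) := by
  have hlen : i < l.length := by simp [revSeg] at hi; omega
  unfold revSeg
  simp only [List.getElem_append]
  have h1 : (List.take a l).length = a := by simp; omega
  have h2 : ((List.take (b + 1 - a) (List.drop a l)).reverse).length = b + 1 - a := by
    simp; omega
  simp only [h1, h2, List.length_append]
  split_ifs with hA hB hC hC hB hC hC
  · exact List.getElem_take
  · exact absurd (Or.inl hB) hC
  · rcases hC with h | h <;> omega
  · rw [List.getElem_reverse, List.getElem_take, List.getElem_drop]
    simp only [not_or, not_lt] at hC
    congr 1
    simp only [List.length_take, List.length_drop]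
    omega
  · rw [List.getElem_drop]
    congr 1
    omega
  · simp only [not_or, not_lt] at hB
    omega

lemma revSeg_length (l : List Char) (a b : Nat) (hab : a ≤ b + 1) (hb : b < l.length) :
    (revSeg l a b).length = l.length := by
  simp [revSeg]; omega

lemma revSeg_id (l : List Char) (a b : Nat) (hba : b ≤ a) (hab : a ≤ b + 1) (hb : b < l.length) :
    revSeg l a b = l := by
  apply List.ext_getElem (revSeg_length l a b hab hb)
  intro i h1 h2
  rw [revSeg_getElem l a b hab hb i h1]
  split_ifs with h
  · rfl
  · push_neg at h
    have : i = a := by omega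
    subst this
    congr 1
    omega

lemma revSeg_step (l : List Char) (a b : Nat) (hab : a < b) (hb : b < l.length) :
    revSeg ((l.set a l[b]).set b (l[a]'(by omega))) (a + 1) (b - 1) = revSeg l a b := by
  have hlen2 : ((l.set a l[b]).set b (l[a]'(by omega))).length = l.length := by simp
  apply List.ext_getElem
  · rw [revSeg_length _ _ _ (by omega) (by omega), revSeg_length _ _ _ (by omega) hb, hlen2]
  · intro i h1 h2
    rw [revSeg_getElem _ _ _ (by omega) (by omega) i h1,
        revSeg_getElem _ _ _ (by omega) hb i h2]
    have hil : ∀ (j : Nat) (hj : j < ((l.set a l[b]).set b (l[a]'(by omega))).length),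
        ((l.set a l[b]).set b (l[a]'(by omega)))[j]
          = if b = j then l[a]'(by omega) else if a = j then l[b] else l[j]'(by omega) := by
      intro j hj
      rw [List.getElem_set, List.getElem_set]
    split_ifs with hA hB hB <;>
      rw [hil] <;>
      split_ifs with c1 c2 <;>
      first | rfl | omega | (congr 1; omega)

lemma pyIdx_nonneg (n p : Nat) (hp : p < n) : PySem.List.pyIdx? n (p : Int) = some p := by
  simp [PySem.List.pyIdx?]; omega

lemma pyIdx_neg (n p : Nat) (hp : p < n) : PySem.List.pyIdx? n ((p : Int) - n) = some p := by
  unfold PySem.List.pyIdx?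
  rw [if_neg (by omega), if_pos (by omega)]
  congr 1
  omega

lemma pyGet_at (l : List Char) (p : Nat) (i : Int) (hp : p < l.length)
    (hi : i = (p : Int) ∨ i = (p : Int) - l.length) :
    PySem.List.pyGet? l i = some l[p] := by
  rcases hi with h | h <;> subst h <;>
    simp [PySem.List.pyGet?, pyIdx_nonneg _ _ hp, pyIdx_neg _ _ hp, List.getElem?_eq_getElem hp]

lemma pySet_at (l : List Char) (p : Nat) (i : Int) (v : Char) (hp : p < l.length)
    (hi : i = (p : Int) ∨ i = (p : Int) - l.length) :
    PySem.List.pySet? l i v = some (l.set p v) := by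
  rcases hi with h | h <;> subst h <;>
    simp [PySem.List.pySet?, pyIdx_nonneg _ _ hp, pyIdx_neg _ _ hp]

lemma set_append_cons (P R : List Char) (c v : Char) :
    (P ++ c :: R).set P.length v = P ++ v :: R := by
  induction P with
  | nil => rfl
  | cons p P ih => simp [ih]

lemma innerA (t : Nat) : ∀ (i0 : Int) (k : Nat) (rev pre cur post : List Char),
    cur.length = t → rev.length = k + t →
    (i0 = (pre.length : Int) ∨ i0 = (pre.length : Int) - ((pre.length + t + post.length : Nat) : Int)) →
    (PySem.List.pyRange i0 (i0 + t) 1).foldl (solABody rev) (some (pre ++ cur ++ post, (k : Int)))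
      = some (pre ++ rev.drop k ++ post, ((k + t : Nat) : Int)) := by
  induction t with
  | zero =>
    intro i0 k rev pre cur post hcur hrev hi0
    have hcurnil : cur = [] := List.eq_nil_of_length_eq_zero hcur
    have hrg : PySem.List.pyRange i0 (i0 + ((0 : Nat) : Int)) 1 = [] := by
      simp [PySem.List.pyRange]
    rw [hrg, List.foldl_nil, hcurnil]
    have hdk : rev.drop k = [] := by
      have hk : k = rev.length := by omega
      rw [hk, List.drop_length]
    rw [hdk]
    norm_num
  | succ t ih =>
    intro i0 k rev pre cur post hcur hrev hi0
    cases cur with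
    | nil => simp at hcur
    | cons c cur' =>
      have hcur' : cur'.length = t := by simpa using hcur
      have hkrev : k < rev.length := by omega
      have hlt : i0 < i0 + ((t + 1 : Nat) : Int) := by push_cast; omega
      rw [PySem.List.pyRange_one_cons hlt, List.foldl_cons]
      have hN : (pre ++ c :: cur' ++ post).length = pre.length + (t + 1) + post.length := by
        simp; omega
      have hget : PySem.List.pyGet? rev (k : Int) = some (rev[k]'hkrev) := by
        rw [PySem.List.pyGet?_natCast, List.getElem?_eq_getElem hkrev]
      have hi0' : i0 = ((pre.length : Nat) : Int) ∨
          i0 = ((pre.length : Nat) : Int) - ((pre ++ c :: cur' ++ post).length : Int) := by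
        rcases hi0 with h | h
        · exact Or.inl h
        · right; rw [h, hN]
      have hset : PySem.List.pySet? (pre ++ c :: cur' ++ post) i0 (rev[k]'hkrev)
          = some (pre ++ [rev[k]'hkrev] ++ cur' ++ post) := by
        rw [pySet_at (pre ++ c :: cur' ++ post) pre.length i0 _ (by simp) hi0']
        congr 1
        have hassoc : pre ++ c :: cur' ++ post = pre ++ c :: (cur' ++ post) := by simp
        rw [hassoc, set_append_cons]
        simp
      have hbody : solABody rev (some (pre ++ c :: cur' ++ post, (k : Int))) i0
          = some (pre ++ [rev[k]'hkrev] ++ cur' ++ post, (k : Int) + 1) := by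
        simp only [solABody, hget, hset]
      rw [hbody]
      have hstop : i0 + ((t + 1 : Nat) : Int) = (i0 + 1) + ((t : Nat) : Int) := by
        push_cast; ring
      have hcnt : (k : Int) + 1 = (((k + 1 : Nat)) : Int) := by push_cast; ring
      rw [hstop, hcnt]
      rw [ih (i0 + 1) (k + 1) rev (pre ++ [rev[k]'hkrev]) cur' post hcur' (by omega)
          (by rcases hi0 with h | h
              · left; rw [h]; simp
              · right; rw [h]; simp; push_cast; ring)]
      have hdrop : rev.drop k = rev[k]'hkrev :: rev.drop (k + 1) :=
        (List.getElem_cons_drop hkrev).symm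
      rw [hdrop]
      refine congrArg some (Prod.ext ?_ ?_)
      · simp
      · push_cast; ring

lemma aStep_noop (l : List Char) (s e : Int) (h : e < s) : solAStep l s e = some l := by
  have hrg : PySem.List.pyRange s (e + 1) 1 = [] := by
    simp [PySem.List.pyRange]; omega
  simp [solAStep, hrg]

lemma aStep_spec (l : List Char) (a b : Nat) (s e : Int) (hab : a ≤ b) (hb : b < l.length)
    (hcase : (s = (a : Int) ∧ e = (b : Int)) ∨
             (s = (a : Int) - l.length ∧ e = (b : Int) - l.length ∧ b + 2 ≤ l.length)) :
    solAStep l s e = some (revSeg l a b) := by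
  have hslice : PySem.List.slice l (some s) (some (e + 1)) = (l.drop a).take (b + 1 - a) := by
    rcases hcase with ⟨hs, he⟩ | ⟨hs, he, hn⟩
    · subst hs he
      have hcast : ((b : Int) + 1) = ((b + 1 : Nat) : Int) := by push_cast; ring
      rw [hcast, PySem.List.slice_natCast]
    · subst hs he
      have c1 : PySem.List.clampIdx l.length ((a : Int) - l.length) = a := by
        unfold PySem.List.clampIdx
        rw [if_pos (by omega), if_neg (by omega)]
        omega
      have c2 : PySem.List.clampIdx l.length ((b : Int) - l.length + 1) = b + 1 := by
        unfold PySem.List.clampIdx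
        rw [if_pos (by omega), if_neg (by omega)]
        omega
      simp only [PySem.List.slice, c1, c2]
  have hm : ((l.drop a).take (b + 1 - a)).length = b + 1 - a := by simp; omega
  have hrange : e + 1 = s + ((b + 1 - a : Nat) : Int) := by
    rcases hcase with ⟨hs, he⟩ | ⟨hs, he, hn⟩ <;> subst hs he <;> push_cast <;> omega
  have hdecomp : l = l.take a ++ (l.drop a).take (b + 1 - a) ++ l.drop (b + 1) := by
    conv_lhs => rw [← List.take_append_drop a l, ← List.take_append_drop (b + 1 - a) (l.drop a)]
    rw [List.drop_drop]
    have : a + (b + 1 - a) = b + 1 := by omega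
    rw [this, List.append_assoc]
  show ((PySem.List.pyRange s (e + 1) 1).foldl
      (solABody ((PySem.List.slice l (some s) (some (e + 1))).reverse))
      (some (l, (0 : Int)))).map Prod.fst = some (revSeg l a b)
  rw [hslice, hrange]
  have htake : (l.take a).length = a := by simp; omega
  have H := innerA (b + 1 - a) s 0 ((l.drop a).take (b + 1 - a)).reverse (l.take a)
      ((l.drop a).take (b + 1 - a)) (l.drop (b + 1)) hm (by simp; omega)
      (by rcases hcase with ⟨hs, _⟩ | ⟨hs, _, hn⟩
          · left; rw [hs, htake]
          · right
            have htot : (l.take a).length + (b + 1 - a) + (l.drop (b + 1)).length = l.length := by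
              simp; omega
            rw [htot, htake, hs])
  simp only [Nat.cast_zero, List.drop_zero, Nat.zero_add] at H
  rw [← hdecomp] at H
  rw [H]
  rfl

lemma bSwap_spec (t : Nat) : ∀ (l : List Char) (a b : Nat) (i j : Int),
    (b + 1) - a = t → a ≤ b + 1 → b < l.length →
    ((i = (a : Int) ∧ j = (b : Int)) ∨ (i = (a : Int) - l.length ∧ j = (b : Int) - l.length)) →
    solBSwap l i j = some (revSeg l a b) := by
  induction t using Nat.strong_induction_on with
  | _ t ihs =>
  intro l a b i j ht hab hb hij
  by_cases hlt : a < b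
  · have ha : a < l.length := by omega
    have hij' : i < j := by rcases hij with ⟨h1, h2⟩ | ⟨h1, h2⟩ <;> omega
    have hgi : PySem.List.pyGet? l i = some (l[a]'ha) :=
      pyGet_at l a i ha (by rcases hij with ⟨h1, _⟩ | ⟨h1, _⟩; exact Or.inl h1; exact Or.inr h1)
    have hgj : PySem.List.pyGet? l j = some (l[b]'hb) :=
      pyGet_at l b j hb (by rcases hij with ⟨_, h2⟩ | ⟨_, h2⟩; exact Or.inl h2; exact Or.inr h2)
    have hs1 : PySem.List.pySet? l i (l[b]'hb) = some (l.set a (l[b]'hb)) :=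
      pySet_at l a i _ ha (by rcases hij with ⟨h1, _⟩ | ⟨h1, _⟩; exact Or.inl h1; exact Or.inr h1)
    have hlen1 : (l.set a (l[b]'hb)).length = l.length := by simp
    have hs2 : PySem.List.pySet? (l.set a (l[b]'hb)) j (l[a]'ha)
        = some ((l.set a (l[b]'hb)).set b (l[a]'ha)) :=
      pySet_at _ b j _ (by omega)
        (by rw [hlen1]; rcases hij with ⟨_, h2⟩ | ⟨_, h2⟩; exact Or.inl h2; exact Or.inr h2)
    rw [solBSwap, if_pos hij']
    simp only [hgi, hgj, hs1, hs2]
    rw [← revSeg_step l a b hlt hb]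
    apply ihs ((b - 1) + 1 - (a + 1)) (by omega) _ (a + 1) (b - 1) (i + 1) (j - 1) rfl
      (by omega) (by simp; omega)
    rcases hij with ⟨h1, h2⟩ | ⟨h1, h2⟩
    · left; constructor <;> [omega; (push_cast; omega)]
    · right
      have : ((l.set a (l[b]'hb)).set b (l[a]'ha)).length = l.length := by simp
      rw [this]
      constructor <;> (push_cast; omega)
  · have hij' : ¬ i < j := by rcases hij with ⟨h1, h2⟩ | ⟨h1, h2⟩ <;> omega
    rw [solBSwap, if_neg hij', revSeg_id l a b (by omega) hab hb]

lemma step_agree (l : List Char) (s e : Int)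
    (h : s ≤ e → ((0 ≤ s ∧ e < (l.length : Int)) ∨ (-(l.length : Int) ≤ s ∧ e ≤ -2))) :
    ∃ l', solAStep l s e = some l' ∧ solBSwap l s e = some l' ∧ l'.length = l.length := by
  by_cases hse : s ≤ e
  · rcases h hse with ⟨h0, hlt⟩ | ⟨hge, hneg⟩
    · refine ⟨revSeg l s.toNat e.toNat, ?_, ?_, ?_⟩
      · exact aStep_spec l s.toNat e.toNat s e (by omega) (by omega)
          (Or.inl ⟨by omega, by omega⟩)
      · exact bSwap_spec ((e.toNat + 1) - s.toNat) l s.toNat e.toNat s e rfl (by omega)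
          (by omega) (Or.inl ⟨by omega, by omega⟩)
      · exact revSeg_length l s.toNat e.toNat (by omega) (by omega)
    · have hn : 0 < (l.length : Int) := by omega
      refine ⟨revSeg l (s + l.length).toNat (e + l.length).toNat, ?_, ?_, ?_⟩
      · exact aStep_spec l (s + l.length).toNat (e + l.length).toNat s e (by omega) (by omega)
          (Or.inr ⟨by omega, by omega, by omega⟩)
      · exact bSwap_spec (((e + l.length).toNat + 1) - (s + l.length).toNat) l
          (s + l.length).toNat (e + l.length).toNat s e rfl (by omega) (by omega)
          (Or.inr ⟨by omega, by omega⟩)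
      · exact revSeg_length l (s + l.length).toNat (e + l.length).toNat (by omega) (by omega)
  · refine ⟨l, aStep_noop l s e (by omega), ?_, rfl⟩
    rw [solBSwap, if_neg (by omega)]

lemma fold_agree (queries : List (Int × Int)) : ∀ (l : List Char),
    (∀ q ∈ queries, q.1 ≤ q.2 →
      ((0 ≤ q.1 ∧ q.2 < (l.length : Int)) ∨ (-(l.length : Int) ≤ q.1 ∧ q.2 ≤ -2))) →
    queries.foldl (fun st q => st.bind (fun l => solAStep l q.1 q.2)) (some l)
      = queries.foldl (fun st q => st.bind (fun l => solBSwap l q.1 q.2)) (some l) := by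
  induction queries with
  | nil => intro l _; rfl
  | cons q qs ih =>
    intro l hpre
    obtain ⟨l', hA, hB, hlen⟩ := step_agree l q.1 q.2 (hpre q (by simp))
    rw [List.foldl_cons, List.foldl_cons]
    simp only [Option.bind_some, hA, hB]
    exact ih l' (by intro p hp; rw [hlen]; exact hpre p (by simp [hp]))

-- ===== VERDICT (by name: the statement is the Claim_ definition above) =====
theorem solution_spec : Claim_equal_solution := by
  intro my_string queries _hdom hpre
  unfold Spec_solution solution solution_alt
  rw [fold_agree queries my_string.toList hpre]
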